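-- pv_equiv track=rewrite | github.com/inaciovasquez2020/cyclone-terminal-obstruction | scripts/search_circuit_minimal.py | is_minimal_support
-- ===== SOURCE A (Python) =====
-- def is_kernel(rows: list[int], x: int) -> bool:
--     for row in rows:
--         if ((row & x).bit_count() & 1) != 0:
--             return False
--     return True
--
-- def is_minimal_support(rows: list[int], x: int) -> bool:
--     if x == 0 or not is_kernel(rows, x):
--         return False
--     y = x
--     while y:
--         b = y & -y
--         if is_kernel(rows, x ^ b):
--             return False
--         y ^= b
--     return True
-- ===== SOURCE B (Python) =====
-- def is_minimal_support(rows: list[int], x: int) -> bool: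
--     if x == 0:
--         return False
--     if any((row & x).bit_count() & 1 for row in rows):
--         return False
--     support = 0
--     for row in rows:
--         support |= row
--     return (x & support) == x
-- ===== Notes on version B (the rewrite author's own statement) =====
-- stated objective: alternative
-- what changed: A re-runs a full kernel parity pass over all rows for every set bit of x (testing x^b per lowest bit); B computes the OR of all rows once and checks (x & OR) == x, since removing bit b keeps x in the kernel exactly when column b is all-zero.
-- outside the precondition, e.g. on is_minimal_support([1], -1): A returns False, B returns False; on is_minimal_support([-6, -5], -5): A returns False, B returns True; on is_minimal_support([-1], -6): A does not finish within the time limit, B returns True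
import Mathlib
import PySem

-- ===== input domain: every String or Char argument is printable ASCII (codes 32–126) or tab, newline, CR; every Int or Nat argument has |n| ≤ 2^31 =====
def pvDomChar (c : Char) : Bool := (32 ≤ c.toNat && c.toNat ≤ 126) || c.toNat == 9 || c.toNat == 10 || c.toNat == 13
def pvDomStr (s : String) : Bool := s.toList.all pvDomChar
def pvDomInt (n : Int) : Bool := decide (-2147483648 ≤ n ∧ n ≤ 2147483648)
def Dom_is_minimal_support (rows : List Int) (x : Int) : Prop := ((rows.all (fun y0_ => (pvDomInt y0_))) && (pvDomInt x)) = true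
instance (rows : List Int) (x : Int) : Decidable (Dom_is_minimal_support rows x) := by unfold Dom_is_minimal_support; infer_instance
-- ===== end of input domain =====

-- B replaces A's per-bit re-scan of all rows (one is_kernel pass per set bit of x) by a single
-- OR-of-rows support mask, checked once: same return value on every x ≥ 0 (Pre_).

-- lemmas the port of A needs for termination (cited in decreasing_by); proofs-only lemmas are below the claim block
theorem pv_double_testBit_succ (m j : Nat) : (2 * m).testBit (j + 1) = m.testBit j := by
  rw [Nat.testBit_add_one]
  congr 1
  omega

theorem pv_double_testBit_zero (m : Nat) : (2 * m).testBit 0 = false := by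
  simp [Nat.testBit_zero, Nat.mul_mod_right]

theorem pv_lowbit : ∀ (n : Nat), 0 < n → ∃ i, n.testBit i = true ∧ n - (n &&& (n - 1)) = 2 ^ i := by
  intro n
  induction n using Nat.strong_induction_on with
  | _ n ih =>
    intro hn
    rcases Nat.mod_two_eq_zero_or_one n with he | ho
    · -- n even: n = 2k, recurse on k
      obtain ⟨k, hk⟩ : ∃ k, n = 2 * k := ⟨n / 2, by omega⟩
      have hkpos : 0 < k := by omega
      obtain ⟨i, hbit, hval⟩ := ih k (by omega) hkpos
      have hand : n &&& (n - 1) = 2 * (k &&& (k - 1)) := by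
        apply Nat.eq_of_testBit_eq
        intro j
        cases j with
        | zero =>
          rw [pv_double_testBit_zero]
          simp [Nat.testBit_land, hk, pv_double_testBit_zero]
        | succ j =>
          rw [pv_double_testBit_succ]
          simp only [Nat.testBit_land, hk, pv_double_testBit_succ]
          congr 1
          rw [Nat.testBit_add_one]
          congr 1
          omega
      refine ⟨i + 1, ?_, ?_⟩
      · rw [hk, pv_double_testBit_succ]; exact hbit
      · have hle : k &&& (k - 1) ≤ k := Nat.and_le_left
        rw [hand, hk, pow_succ]
        omega
    · -- n odd: lowest bit is bit 0 and n &&& (n-1) = n - 1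
      have hand : n &&& (n - 1) = n - 1 := by
        apply Nat.eq_of_testBit_eq
        intro j
        cases j with
        | zero =>
          simp only [Nat.testBit_land, Nat.testBit_zero]
          have : (n - 1) % 2 = 0 := by omega
          simp [this]
        | succ j =>
          have h2 : n / 2 = (n - 1) / 2 := by omega
          simp only [Nat.testBit_add_one, Nat.and_div_two, Nat.testBit_land, h2, Bool.and_self]
      refine ⟨0, ?_, ?_⟩
      · simp [Nat.testBit_zero, ho]
      · rw [hand]; omega

theorem pv_xor_pow_lt (n i : Nat) (h : n.testBit i = true) : n ^^^ 2 ^ i < n := by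
  apply Nat.lt_of_testBit i
  · simp [Nat.testBit_xor, h, Nat.testBit_two_pow_self]
  · exact h
  · intro j hj
    have hne : i ≠ j := by omega
    simp [Nat.testBit_xor, Nat.testBit_two_pow_of_ne hne]

theorem pv_band_neg_self (y : Int) (hy : 0 < y) :
    PySem.Int.band y (-y) = ((y.toNat - (y.toNat &&& (y.toNat - 1)) : Nat) : Int) := by
  have h1 : 0 ≤ y := le_of_lt hy
  have h2 : ¬ (0 ≤ -y) := by omega
  have h3 : (-(-y) - 1).toNat = y.toNat - 1 := by omega
  simp only [PySem.Int.band, if_pos h1, if_neg h2, h3]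

theorem pv_loop_dec (y : Int) (hy : 0 < y) :
    (PySem.Int.bxor y (PySem.Int.band y (-y))).natAbs < y.natAbs := by
  obtain ⟨i, hbit, hval⟩ := pv_lowbit y.toNat (by omega)
  rw [pv_band_neg_self y hy, hval,
    PySem.Int.bxor_of_nonneg (le_of_lt hy) (by positivity)]
  simp only [Int.natAbs_natCast, Int.toNat_natCast]
  have := pv_xor_pow_lt y.toNat i hbit
  omega

-- ===== PORT A =====
def is_kernel (rows : List Int) (x : Int) : Bool :=
  match rows with
  | [] => true
  | row :: rest =>
    if (PySem.Int.bitCount (PySem.Int.band row x) &&& 1) != 0 then false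
    else is_kernel rest x

-- the while-loop of A; Python loops while y is truthy — for y < 0 (unreachable under Pre_,
-- where y starts at x ≥ 0 and only loses bits) the guard merely makes the recursion total
def pv_min_loop (rows : List Int) (x : Int) (y : Int) : Bool :=
  if h : y ≤ 0 then (if y = 0 then true else false)
  else
    let b := PySem.Int.band y (-y)
    if is_kernel rows (PySem.Int.bxor x b) then false
    else pv_min_loop rows x (PySem.Int.bxor y b)
termination_by y.natAbs
decreasing_by exact pv_loop_dec y (by omega)

def is_minimal_support (rows : List Int) (x : Int) : Bool :=
  if x == 0 || !is_kernel rows x then false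
  else pv_min_loop rows x x

-- ===== PORT B =====
def is_minimal_support_alt (rows : List Int) (x : Int) : Bool :=
  if x == 0 then false
  else if rows.any (fun row => (PySem.Int.bitCount (PySem.Int.band row x) &&& 1) != 0) then false
  else
    let support := rows.foldl (fun s row => PySem.Int.bor s row) 0
    PySem.Int.band x support == x

-- ===== PRECONDITION & SPEC =====
-- Pre_ excludes x < 0: there A's bit-clearing loop runs forever on some inputs (e.g. rows = [-1],
-- x = -6, where every kernel test stays odd), and on the rest a negative x has an infinite
-- two's-complement bit set, a corner neither program's answer is specified for.
def Pre_is_minimal_support (rows : List Int) (x : Int) : Prop := 0 ≤ x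
instance (rows : List Int) (x : Int) : Decidable (Pre_is_minimal_support rows x) := by unfold Pre_is_minimal_support; infer_instance
def pvWitness_is_minimal_support : List Int × Int := ([3, 5], 6)
def Spec_is_minimal_support (rows : List Int) (x : Int) (out : Bool) : Prop := out = is_minimal_support_alt rows x
instance (rows : List Int) (x : Int) (out : Bool) : Decidable (Spec_is_minimal_support rows x out) := by unfold Spec_is_minimal_support; infer_instance

-- ===== CLAIM (what is proved, stated in full; the proofs are below) =====
def Claim_equal_is_minimal_support : Prop := ∀ (rows : List Int) (x : Int), Dom_is_minimal_support rows x → Pre_is_minimal_support rows x → Spec_is_minimal_support rows x (is_minimal_support rows x)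

-- ===== LEMMAS AND PROOFS =====

theorem pv_and_mod_two (u v : Nat) : (u &&& v) % 2 = 1 ↔ (u % 2 = 1 ∧ v % 2 = 1) := by
  have h0 := Nat.testBit_land u v 0
  rw [Bool.eq_iff_iff] at h0
  simp only [Nat.testBit_zero, Bool.and_eq_true, decide_eq_true_eq] at h0
  exact h0

theorem pv_xor_mod_two (u v : Nat) : (u ^^^ v) % 2 = (u % 2 + v % 2) % 2 := by
  have h0 := Nat.testBit_xor u v 0
  rw [Bool.eq_iff_iff] at h0
  simp only [Nat.testBit_zero] at h0
  rcases Nat.mod_two_eq_zero_or_one u with hu | hu <;>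
    rcases Nat.mod_two_eq_zero_or_one v with hv | hv <;>
    rw [hu, hv] at h0 ⊢ <;> simp at h0 ⊢ <;> omega

theorem pv_and_xor_add : ∀ (a m : Nat), (a &&& m) + (a ^^^ (a &&& m)) = a := by
  intro a
  induction a using Nat.strong_induction_on with
  | _ a ih =>
    intro m
    rcases Nat.eq_zero_or_pos a with rfl | ha
    · simp
    · have hdiv : (a &&& m) / 2 + ((a ^^^ (a &&& m)) / 2) = a / 2 := by
        have h1 := ih (a / 2) (Nat.div_lt_self ha (by norm_num)) (m / 2)
        rw [Nat.xor_div_two, Nat.and_div_two]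
        exact h1
      have hb := pv_and_mod_two a m
      have hc := pv_xor_mod_two a (a &&& m)
      omega

theorem pv_sub_and (a m : Nat) : a - (a &&& m) = a ^^^ (a &&& m) := by
  have := pv_and_xor_add a m; omega

theorem pv_testBit_sub_and (a m i : Nat) :
    (a - (a &&& m)).testBit i = (a.testBit i && !(m.testBit i)) := by
  rw [pv_sub_and]
  simp only [Nat.testBit_xor, Nat.testBit_land]
  cases a.testBit i <;> cases m.testBit i <;> rfl


-- bit i of a Python int (two's complement; negative ints have all high bits set)
def pv_ibit (r : Int) (i : Nat) : Bool :=
  if 0 ≤ r then r.toNat.testBit i else !((-r - 1).toNat.testBit i)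

theorem pv_bool_eq {a b : Bool} (h : a = true ↔ b = true) : a = b := by
  cases a <;> cases b <;> simp_all

theorem pv_band_testBit (a b : Int) (i : Nat) (ha : 0 ≤ a) :
    (PySem.Int.band a b).toNat.testBit i = (a.toNat.testBit i && pv_ibit b i) := by
  by_cases hb : 0 ≤ b
  · simp [PySem.Int.band, ha, hb, pv_ibit, Nat.testBit_land]
  · simp [PySem.Int.band, if_pos ha, if_neg hb, pv_ibit, Int.toNat_natCast,
      pv_testBit_sub_and]

theorem pv_ibit_neg_form (k : Nat) (i : Nat) : pv_ibit (-(k : Int) - 1) i = !(k.testBit i) := by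
  have h1 : ¬ (0 ≤ -(k : Int) - 1) := by omega
  have h2 : (-(-(k : Int) - 1) - 1).toNat = k := by omega
  rw [pv_ibit, if_neg h1, h2]

theorem pv_bor_ibit (a b : Int) (i : Nat) :
    pv_ibit (PySem.Int.bor a b) i = (pv_ibit a i || pv_ibit b i) := by
  by_cases ha : 0 ≤ a <;> by_cases hb : 0 ≤ b
  · simp [PySem.Int.bor, ha, hb, pv_ibit, Nat.testBit_or]
  · have : PySem.Int.bor a b = -(((-b - 1).toNat - ((-b - 1).toNat &&& a.toNat) : Nat) : Int) - 1 := by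
      simp [PySem.Int.bor, ha, hb]
    rw [this, pv_ibit_neg_form, pv_testBit_sub_and]
    simp only [pv_ibit, if_pos ha, if_neg hb]
    cases a.toNat.testBit i <;> cases ((-b - 1).toNat.testBit i) <;> rfl
  · have : PySem.Int.bor a b = -(((-a - 1).toNat - ((-a - 1).toNat &&& b.toNat) : Nat) : Int) - 1 := by
      simp [PySem.Int.bor, ha, hb]
    rw [this, pv_ibit_neg_form, pv_testBit_sub_and]
    simp only [pv_ibit, if_pos hb, if_neg ha]
    cases b.toNat.testBit i <;> cases ((-a - 1).toNat.testBit i) <;> rfl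
  · have : PySem.Int.bor a b = -((((-a - 1).toNat &&& (-b - 1).toNat) : Nat) : Int) - 1 := by
      simp [PySem.Int.bor, ha, hb]
    rw [this, pv_ibit_neg_form]
    simp only [pv_ibit, if_neg ha, if_neg hb, Nat.testBit_land]
    cases ((-a - 1).toNat.testBit i) <;> cases ((-b - 1).toNat.testBit i) <;> rfl

theorem pv_bitCount_xor_aux : ∀ (N u v : Nat), u + v ≤ N →
    PySem.Int.bitCount ((u ^^^ v : Nat) : Int) % 2
      = (PySem.Int.bitCount (u : Int) + PySem.Int.bitCount (v : Int)) % 2 := by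
  intro N
  induction N with
  | zero =>
    intro u v h
    have hu : u = 0 := by omega
    have hv : v = 0 := by omega
    simp [hu, hv]
  | succ N ih =>
    intro u v h
    rcases Nat.eq_zero_or_pos u with rfl | hu
    · simp
    rcases Nat.eq_zero_or_pos v with rfl | hv
    · simp
    by_cases huv : u = v
    · subst huv
      simp only [Nat.xor_self]
      have : PySem.Int.bitCount ((0 : Nat) : Int) = 0 := by simpa using PySem.Int.bitCount_zero
      omega
    · have hx : 0 < u ^^^ v := by
        rcases Nat.eq_zero_or_pos (u ^^^ v) with h0 | h0
        · exact absurd (Nat.eq_of_xor_eq_zero h0) huv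
        · exact h0
      rw [PySem.Int.bitCount_natCast hx, PySem.Int.bitCount_natCast hu, PySem.Int.bitCount_natCast hv]
      rw [Nat.xor_div_two]
      have hrec := ih (u / 2) (v / 2) (by omega)
      have hm := pv_xor_mod_two u v
      omega

theorem pv_bitCount_xor (u v : Nat) :
    PySem.Int.bitCount ((u ^^^ v : Nat) : Int) % 2
      = (PySem.Int.bitCount (u : Int) + PySem.Int.bitCount (v : Int)) % 2 :=
  pv_bitCount_xor_aux (u + v) u v le_rfl

theorem pv_bitCount_pow (i : Nat) : PySem.Int.bitCount ((2 ^ i : Nat) : Int) = 1 := by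
  induction i with
  | zero => decide
  | succ i ih =>
    have hp : 0 < 2 ^ (i + 1) := by positivity
    rw [PySem.Int.bitCount_natCast hp]
    have h1 : 2 ^ (i + 1) % 2 = 0 := by
      simp [Nat.pow_succ, Nat.mul_mod_left]
    have h2 : 2 ^ (i + 1) / 2 = 2 ^ i := by
      rw [Nat.pow_succ]
      omega
    rw [h1, h2, ih]

theorem pv_isker_iff (rows : List Int) (z : Int) :
    is_kernel rows z = true ↔
      ∀ r ∈ rows, PySem.Int.bitCount (PySem.Int.band r z) % 2 = 0 := by
  induction rows with
  | nil => simp [is_kernel]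
  | cons r rest ih =>
    simp only [is_kernel]
    split
    · rename_i hodd
      simp only [bne_iff_ne, ne_eq, Nat.and_one_is_mod] at hodd
      constructor
      · intro hfalse; exact absurd hfalse (by simp)
      · intro hall
        exact absurd (hall r (by simp)) hodd
    · rename_i heven
      simp only [bne_iff_ne, ne_eq, Nat.and_one_is_mod, not_not] at heven
      rw [ih]
      constructor
      · intro hall s hs
        rcases List.mem_cons.mp hs with rfl | hs
        · exact heven
        · exact hall s hs
      · intro hall s hs
        exact hall s (List.mem_cons_of_mem _ hs)

theorem pv_band_toNat_eq (r x : Int) (i : Nat) (hx : 0 ≤ x) :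
    (PySem.Int.band r (PySem.Int.bxor x ((2 ^ i : Nat) : Int))).toNat
      = (PySem.Int.band r x).toNat ^^^ (if pv_ibit r i then 2 ^ i else 0) := by
  have hz : PySem.Int.bxor x ((2 ^ i : Nat) : Int) = ((x.toNat ^^^ 2 ^ i : Nat) : Int) := by
    rw [PySem.Int.bxor_of_nonneg hx (by positivity), Int.toNat_natCast]
  rw [hz, PySem.Int.band_comm r _, PySem.Int.band_comm r x]
  apply Nat.eq_of_testBit_eq
  intro j
  rw [Nat.testBit_xor, pv_band_testBit _ _ _ (by positivity), pv_band_testBit _ _ _ hx]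
  simp only [Int.toNat_natCast, Nat.testBit_xor]
  by_cases hij : j = i
  · subst hij
    simp only [Nat.testBit_two_pow_self]
    cases h : pv_ibit r j <;> cases x.toNat.testBit j <;>
      simp [h, Nat.testBit_two_pow_self, Nat.zero_testBit]
  · have hne : i ≠ j := fun h => hij h.symm
    simp only [Nat.testBit_two_pow_of_ne hne]
    cases h : pv_ibit r i <;>
      simp [Nat.testBit_two_pow_of_ne hne, Nat.zero_testBit]

theorem pv_row_flip_true (r x : Int) (i : Nat) (hx : 0 ≤ x) (h : pv_ibit r i = true) :
    PySem.Int.bitCount (PySem.Int.band r (PySem.Int.bxor x ((2 ^ i : Nat) : Int))) % 2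
      = (PySem.Int.bitCount (PySem.Int.band r x) + 1) % 2 := by
  have hb1 : 0 ≤ PySem.Int.band r x := by
    rw [PySem.Int.band_comm]; exact PySem.Int.band_nonneg_of_nonneg_left _ hx
  have hb2 : 0 ≤ PySem.Int.band r (PySem.Int.bxor x ((2 ^ i : Nat) : Int)) := by
    rw [PySem.Int.band_comm]
    apply PySem.Int.band_nonneg_of_nonneg_left
    rw [PySem.Int.bxor_of_nonneg hx (by positivity)]
    positivity
  rw [show PySem.Int.band r (PySem.Int.bxor x ((2 ^ i : Nat) : Int))
        = (((PySem.Int.band r (PySem.Int.bxor x ((2 ^ i : Nat) : Int))).toNat : Nat) : Int) by omega,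
      pv_band_toNat_eq r x i hx, h, if_pos rfl]
  rw [show PySem.Int.band r x = (((PySem.Int.band r x).toNat : Nat) : Int) by omega]
  rw [pv_bitCount_xor, pv_bitCount_pow]
  simp only [Int.toNat_natCast]

theorem pv_row_flip_false (r x : Int) (i : Nat) (hx : 0 ≤ x) (h : pv_ibit r i = false) :
    PySem.Int.bitCount (PySem.Int.band r (PySem.Int.bxor x ((2 ^ i : Nat) : Int)))
      = PySem.Int.bitCount (PySem.Int.band r x) := by
  have hb1 : 0 ≤ PySem.Int.band r x := by
    rw [PySem.Int.band_comm]; exact PySem.Int.band_nonneg_of_nonneg_left _ hx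
  have hb2 : 0 ≤ PySem.Int.band r (PySem.Int.bxor x ((2 ^ i : Nat) : Int)) := by
    rw [PySem.Int.band_comm]
    apply PySem.Int.band_nonneg_of_nonneg_left
    rw [PySem.Int.bxor_of_nonneg hx (by positivity)]
    positivity
  rw [show PySem.Int.band r (PySem.Int.bxor x ((2 ^ i : Nat) : Int))
        = (((PySem.Int.band r (PySem.Int.bxor x ((2 ^ i : Nat) : Int))).toNat : Nat) : Int) by omega,
      pv_band_toNat_eq r x i hx, h, if_neg (by simp), Nat.xor_zero]
  rw [show PySem.Int.band r x = (((PySem.Int.band r x).toNat : Nat) : Int) by omega]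
  simp only [Int.toNat_natCast]

theorem pv_kernel_flip (rows : List Int) (x : Int) (i : Nat) (hx : 0 ≤ x)
    (hker : is_kernel rows x = true) :
    is_kernel rows (PySem.Int.bxor x ((2 ^ i : Nat) : Int))
      = rows.all (fun r => !pv_ibit r i) := by
  apply pv_bool_eq
  rw [pv_isker_iff, List.all_eq_true]
  rw [pv_isker_iff] at hker
  constructor
  · intro hall r hr
    have h3 := hker r hr
    cases h : pv_ibit r i
    · simp
    · exfalso
      have h2 := pv_row_flip_true r x i hx h
      have h1 := hall r hr
      omega
  · intro hall r hr
    have h3 := hker r hr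
    cases h : pv_ibit r i
    · rw [pv_row_flip_false r x i hx h]
      exact h3
    · have h1 := hall r hr
      rw [h] at h1
      simp at h1

theorem pv_any_eq_not_all (rows : List Int) (i : Nat) :
    rows.any (fun r => pv_ibit r i) = !rows.all (fun r => !pv_ibit r i) := by
  induction rows with
  | nil => rfl
  | cons r rest ih => simp [List.any_cons, List.all_cons, ih]

theorem pv_loop_iff : ∀ (N : Nat) (rows : List Int) (x y : Int), y.natAbs ≤ N → 0 ≤ x → 0 ≤ y →
    is_kernel rows x = true →
    (pv_min_loop rows x y = true ↔
      ∀ i, y.toNat.testBit i = true → rows.any (fun r => pv_ibit r i) = true) := by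
  intro N
  induction N with
  | zero =>
    intro rows x y hN hx hy hker
    have : y = 0 := by omega
    subst this
    rw [pv_min_loop]
    simp [Nat.zero_testBit]
  | succ N ih =>
    intro rows x y hN hx hy hker
    rcases eq_or_lt_of_le hy with rfl | hpos
    · rw [pv_min_loop]
      simp [Nat.zero_testBit]
    · obtain ⟨i, hbit, hval⟩ := pv_lowbit y.toNat (by omega)
      have hb : PySem.Int.band y (-y) = ((2 ^ i : Nat) : Int) := by
        rw [pv_band_neg_self y hpos, hval]
      rw [pv_min_loop, dif_neg (by omega : ¬ y ≤ 0)]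
      simp only [hb]
      rw [pv_kernel_flip rows x i hx hker]
      by_cases hall : rows.all (fun r => !pv_ibit r i) = true
      · rw [if_pos hall]
        constructor
        · intro h; exact absurd h (by simp)
        · intro h
          have := h i hbit
          rw [pv_any_eq_not_all, hall] at this
          simp at this
      · rw [if_neg hall]
        have hy' : PySem.Int.bxor y ((2 ^ i : Nat) : Int) = ((y.toNat ^^^ 2 ^ i : Nat) : Int) := by
          rw [PySem.Int.bxor_of_nonneg hy (by positivity), Int.toNat_natCast]
        have hlt := pv_xor_pow_lt y.toNat i hbit
        rw [hy']
        rw [ih rows x _ (by rw [Int.natAbs_natCast]; omega) hx (by positivity) hker]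
        have hcov : rows.any (fun r => pv_ibit r i) = true := by
          rw [pv_any_eq_not_all]
          simp [hall]
        simp only [Int.toNat_natCast]
        constructor
        · intro h j hj
          by_cases hji : j = i
          · subst hji; exact hcov
          · apply h j
            rw [Nat.testBit_xor, hj, Nat.testBit_two_pow_of_ne (fun h => hji h.symm)]
            rfl
        · intro h j hj
          rw [Nat.testBit_xor] at hj
          by_cases hji : j = i
          · subst hji; exact hcov
          · rw [Nat.testBit_two_pow_of_ne (fun h => hji h.symm)] at hj
            simp at hj
            exact h j hj

theorem pv_foldl_bor_ibit : ∀ (rows : List Int) (s : Int) (i : Nat),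
    pv_ibit (rows.foldl (fun acc row => PySem.Int.bor acc row) s) i
      = (pv_ibit s i || rows.any (fun r => pv_ibit r i)) := by
  intro rows
  induction rows with
  | nil => simp
  | cons r rest ih =>
    intro s i
    simp only [List.foldl_cons, List.any_cons, ih, pv_bor_ibit]
    cases pv_ibit s i <;> cases pv_ibit r i <;> simp

theorem pv_band_support_iff (x s : Int) (hx : 0 ≤ x) :
    (PySem.Int.band x s == x) = true ↔
      ∀ i, x.toNat.testBit i = true → pv_ibit s i = true := by
  rw [beq_iff_eq]
  have hnn : 0 ≤ PySem.Int.band x s := PySem.Int.band_nonneg_of_nonneg_left _ hx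
  constructor
  · intro h i hi
    have := pv_band_testBit x s i hx
    rw [h] at this
    rw [hi] at this
    cases hs : pv_ibit s i
    · rw [hs] at this; simp at this
    · rfl
  · intro h
    have : (PySem.Int.band x s).toNat = x.toNat := by
      apply Nat.eq_of_testBit_eq
      intro i
      rw [pv_band_testBit x s i hx]
      cases hi : x.toNat.testBit i
      · rfl
      · rw [h i hi]; rfl
    omega

theorem pv_ibit_zero (i : Nat) : pv_ibit 0 i = false := by
  simp [pv_ibit, Nat.zero_testBit]

theorem pv_any_odd (rows : List Int) (x : Int) :
    rows.any (fun row => (PySem.Int.bitCount (PySem.Int.band row x) &&& 1) != 0)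
      = !is_kernel rows x := by
  apply pv_bool_eq
  rw [List.any_eq_true, Bool.not_eq_eq_eq_not, Bool.not_true, ← Bool.not_eq_true,
    pv_isker_iff]
  push_neg
  constructor
  · rintro ⟨r, hr, hp⟩
    simp only [bne_iff_ne, ne_eq, Nat.and_one_is_mod] at hp
    exact ⟨r, hr, hp⟩
  · rintro ⟨r, hr, hp⟩
    refine ⟨r, hr, ?_⟩
    simp only [bne_iff_ne, ne_eq, Nat.and_one_is_mod]
    exact hp

-- ===== VERDICT (by name: the statement is the Claim_ definition above) =====
theorem is_minimal_support_spec : Claim_equal_is_minimal_support := by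
  intro rows x _hdom hx
  unfold Spec_is_minimal_support is_minimal_support is_minimal_support_alt
  have hx' : (0:Int) ≤ x := hx
  by_cases hx0 : x = 0
  · subst hx0; simp
  · by_cases hker : is_kernel rows x = true
    · rw [if_neg (by simp [hx0, hker] : ¬ ((x == 0 || !is_kernel rows x) = true)),
          if_neg (by simpa using hx0 : ¬ ((x == 0) = true)),
          if_neg (by rw [pv_any_odd, hker]; simp :
            ¬ ((rows.any (fun row => (PySem.Int.bitCount (PySem.Int.band row x) &&& 1) != 0)) = true))]
      apply pv_bool_eq
      rw [pv_loop_iff x.natAbs rows x x le_rfl hx' hx' hker]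
      show _ ↔ (PySem.Int.band x (rows.foldl (fun s row => PySem.Int.bor s row) 0) == x) = true
      rw [pv_band_support_iff x _ hx']
      constructor
      · intro h i hi
        rw [pv_foldl_bor_ibit, pv_ibit_zero]
        simpa using h i hi
      · intro h i hi
        have h2 := h i hi
        rw [pv_foldl_bor_ibit, pv_ibit_zero] at h2
        simpa using h2
    · have hkf : is_kernel rows x = false := by simpa using hker
      rw [if_pos (by simp [hkf] : ((x == 0 || !is_kernel rows x) = true)),
          if_neg (by simpa using hx0 : ¬ ((x == 0) = true)),
          if_pos (by rw [pv_any_odd, hkf]; rfl :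
            ((rows.any (fun row => (PySem.Int.bitCount (PySem.Int.band row x) &&& 1) != 0)) = true))]
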